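-- pv_equiv track=rewrite | github.com/JaketheCake08/PythonCode | traducteur_if_for_loop.py | traducteur
-- ===== SOURCE A (Python) =====
-- def traducteur(phrase):
--     traduction = ""
--     for lettre in phrase:
--         if lettre.lower() in "aeiou":
--             if lettre.isupper():
--                 traduction = traduction + "B"
--             else:
--                 traduction = traduction + "b"
--         else:
--             traduction = traduction + lettre
--     return traduction
-- ===== SOURCE B (Python) =====
-- def traducteur(phrase):
--     table = str.maketrans({v: "b" for v in "aeiou"} | {V: "B" for V in "AEIOU"})
--     return phrase.translate(table)
-- ===== Notes on version B (the rewrite author's own statement) =====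
-- stated objective: idiomatic
-- what changed: Replaced the explicit per-character loop with if/else branches and repeated string concatenation by building a ten-entry translation table once and doing a single phrase.translate(table) bulk pass.
import Mathlib
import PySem

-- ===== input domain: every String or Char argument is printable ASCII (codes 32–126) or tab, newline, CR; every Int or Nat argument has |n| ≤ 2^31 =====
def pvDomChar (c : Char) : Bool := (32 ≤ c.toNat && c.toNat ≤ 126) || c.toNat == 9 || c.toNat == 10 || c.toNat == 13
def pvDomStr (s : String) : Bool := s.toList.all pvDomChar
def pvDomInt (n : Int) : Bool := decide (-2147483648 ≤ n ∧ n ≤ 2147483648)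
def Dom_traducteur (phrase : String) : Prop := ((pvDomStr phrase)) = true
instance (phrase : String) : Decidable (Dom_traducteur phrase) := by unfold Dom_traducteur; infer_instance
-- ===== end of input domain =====

-- B replaces A's per-character loop with if/else branches by a ten-entry translation
-- table built once and a single bulk str.translate pass (objective: idiomatic).

-- ===== PORT A =====
-- A: loop over the characters, appending 'B'/'b' for vowels (by case) and the
-- character itself otherwise.  `lettre.lower() in "aeiou"` on a 1-char string is
-- exactly membership of the lowered character in the five vowel characters.
def traducteur (phrase : String) : String :=
  String.ofList (phrase.toList.foldl
    (fun traduction lettre =>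
      if ("aeiou".toList).contains (PySem.Chars.lowerChar lettre) then
        (if PySem.Chars.isupper lettre then traduction ++ ['B'] else traduction ++ ['b'])
      else traduction ++ [lettre]) [])

-- ===== PORT B =====
-- the translation table str.maketrans builds: each vowel codepoint → its replacement
def pvTable : PySem.Dict Char Char :=
  PySem.Dict.ofList [('a','b'),('e','b'),('i','b'),('o','b'),('u','b'),
                     ('A','B'),('E','B'),('I','B'),('O','B'),('U','B')]

-- B: phrase.translate(table) — one bulk pass mapping each char through the table
def traducteur_alt (phrase : String) : String :=
  String.ofList (phrase.toList.map (fun c => pvTable.getD c c))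

-- ===== PRECONDITION & SPEC =====
def Spec_traducteur (phrase : String) (out : String) : Prop := out = traducteur_alt phrase
instance (phrase : String) (out : String) : Decidable (Spec_traducteur phrase out) := by unfold Spec_traducteur; infer_instance

-- ===== CLAIM (what is proved, stated in full; the proofs are below) =====
def Claim_equal_traducteur : Prop := ∀ (phrase : String), Dom_traducteur phrase → Spec_traducteur phrase (traducteur phrase)

-- ===== LEMMAS AND PROOFS =====

lemma toNat_ofNat' (n : Nat) (h : n < 0xd800) : (Char.ofNat n).toNat = n := by
  rw [Char.toNat_ofNat]; have hv : n.isValidChar := Or.inl h; simp [hv]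

-- lowerChar c is a given lowercase letter v iff c is v itself or its uppercase form
lemma lower_eq_vowel (c v : Char) (h1 : 97 ≤ v.toNat) (h2 : v.toNat ≤ 122) :
    PySem.Chars.lowerChar c = v ↔ (c = v ∨ c.toNat + 32 = v.toNat) := by
  unfold PySem.Chars.lowerChar
  by_cases hu : PySem.Chars.isupper c = true
  · have hb : 65 ≤ c.toNat ∧ c.toNat ≤ 90 := by
      simpa [PySem.Chars.isupper, Char.le_def, UInt32.le_iff_toNat_le] using hu
    rw [if_pos hu]
    constructor
    · intro he
      right
      have := congrArg Char.toNat he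
      rwa [toNat_ofNat' _ (by omega)] at this
    · rintro (rfl | he)
      · omega
      · apply Char.ext; apply UInt32.toNat_inj.mp
        show (Char.ofNat (c.toNat + 32)).toNat = v.toNat
        rw [toNat_ofNat' _ (by omega)]; exact he
  · have hb : ¬ (65 ≤ c.toNat ∧ c.toNat ≤ 90) := by
      intro hcontra
      exact hu (by simpa [PySem.Chars.isupper, Char.le_def, UInt32.le_iff_toNat_le] using hcontra)
    rw [if_neg hu]
    constructor
    · intro he; left; exact he
    · rintro (rfl | he)
      · rfl
      · exact absurd ⟨by omega, by omega⟩ hb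

lemma ne_of_toNat_ne_aux (c v : Char) (h : c ≠ v) : c.toNat ≠ v.toNat := by
  intro he; exact h (Char.ext (UInt32.toNat_inj.mp he))

-- A's per-character decision equals one lookup in B's table, for every character
lemma point (c : Char) :
    (if ("aeiou".toList).contains (PySem.Chars.lowerChar c) then
        (if PySem.Chars.isupper c then 'B' else 'b') else c)
      = pvTable.getD c c := by
  by_cases h10 : c ∈ ['a','e','i','o','u','A','E','I','O','U']
  · fin_cases h10 <;> decide
  · simp only [List.mem_cons, List.not_mem_nil, or_false, not_or] at h10
    obtain ⟨h1,h2,h3,h4,h5,h6,h7,h8,h9,ha⟩ := h10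
    have hv : ("aeiou".toList) = ['a','e','i','o','u'] := by decide
    have hlc : ("aeiou".toList).contains (PySem.Chars.lowerChar c) = false := by
      rw [hv]
      simp only [List.contains_eq_mem, List.mem_cons, List.not_mem_nil, or_false,
        decide_eq_false_iff_not, not_or]
      refine ⟨?_, ?_, ?_, ?_, ?_⟩ <;> rw [lower_eq_vowel c _ (by decide) (by decide)] <;>
        rintro (he | he)
      · exact h1 he
      · exact ne_of_toNat_ne_aux c 'A' h6 (by rw [show ('a'.toNat) = 97 from rfl] at he; rw [show ('A'.toNat) = 65 from rfl]; omega)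
      · exact h2 he
      · exact ne_of_toNat_ne_aux c 'E' h7 (by rw [show ('e'.toNat) = 101 from rfl] at he; rw [show ('E'.toNat) = 69 from rfl]; omega)
      · exact h3 he
      · exact ne_of_toNat_ne_aux c 'I' h8 (by rw [show ('i'.toNat) = 105 from rfl] at he; rw [show ('I'.toNat) = 73 from rfl]; omega)
      · exact h4 he
      · exact ne_of_toNat_ne_aux c 'O' h9 (by rw [show ('o'.toNat) = 111 from rfl] at he; rw [show ('O'.toNat) = 79 from rfl]; omega)
      · exact h5 he
      · exact ne_of_toNat_ne_aux c 'U' ha (by rw [show ('u'.toNat) = 117 from rfl] at he; rw [show ('U'.toNat) = 85 from rfl]; omega)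
    rw [hlc]
    simp only [Bool.false_eq_true, if_false]
    have ht : pvTable = PySem.Dict.mk [('a','b'),('e','b'),('i','b'),('o','b'),('u','b'),
        ('A','B'),('E','B'),('I','B'),('O','B'),('U','B')] := by decide
    rw [ht]
    simp only [PySem.Dict.getD, PySem.Dict.get?_mk_cons,
      beq_eq_false_iff_ne.mpr (Ne.symm h1), beq_eq_false_iff_ne.mpr (Ne.symm h2),
      beq_eq_false_iff_ne.mpr (Ne.symm h3), beq_eq_false_iff_ne.mpr (Ne.symm h4),
      beq_eq_false_iff_ne.mpr (Ne.symm h5), beq_eq_false_iff_ne.mpr (Ne.symm h6),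
      beq_eq_false_iff_ne.mpr (Ne.symm h7), beq_eq_false_iff_ne.mpr (Ne.symm h8),
      beq_eq_false_iff_ne.mpr (Ne.symm h9), beq_eq_false_iff_ne.mpr (Ne.symm ha),
      Bool.false_eq_true, if_false]
    rfl

-- ===== VERDICT (by name: the statement is the Claim_ definition above) =====
theorem traducteur_spec : Claim_equal_traducteur := by
  intro phrase _
  unfold Spec_traducteur traducteur traducteur_alt
  have hbody : (fun (traduction : List Char) lettre =>
      if ("aeiou".toList).contains (PySem.Chars.lowerChar lettre) then
        (if PySem.Chars.isupper lettre then traduction ++ ['B'] else traduction ++ ['b'])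
      else traduction ++ [lettre])
    = (fun (traduction : List Char) lettre => traduction ++
        [if ("aeiou".toList).contains (PySem.Chars.lowerChar lettre) then
          (if PySem.Chars.isupper lettre then 'B' else 'b') else lettre]) := by
    funext t l; split_ifs <;> rfl
  rw [hbody, PySem.List.foldl_append_singleton_eq_map, List.nil_append]
  congr 1
  exact List.map_congr_left (fun c _ => point c)
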